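-- pv_equiv track=rewrite | github.com/BodeaPeGitHub/AI | Problem 1/lab1.py | suma_sub_matricilor
-- ===== SOURCE A (Python) =====
-- def calculare_suma_submatrice(matrix, puncte):
-- 	"""
-- 	Functie care calculeaza suma din matricea sumelor si un punct.
-- 	Returneaza None daca primul punct este mai mare decat cel de al 2-lea.
-- 	In: matricea sumelor, perechea de puncte.
-- 	Out: suma sau None
-- 	"""
-- 	if puncte[0] > puncte[1]:
-- 		return None
-- 	if puncte[0] == (0, 0):
-- 		return matrix[puncte[1][0]][puncte[1][1]]
-- 	A = (puncte[0][0] - 1, puncte[0][1] - 1)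
-- 	B = puncte[1]
-- 	if A[0] < 0:
-- 		return matrix[B[0]][B[1]] - matrix[B[0]][A[1]]
-- 	if A[1] < 0:
-- 		return matrix[B[0]][B[1]] - matrix[A[0]][B[1]]
-- 	return matrix[B[0]][B[1]] + matrix[A[0]][A[1]] - matrix[A[0]][B[1]] - matrix[B[0]][A[1]]
--
-- def	suma_sub_matricilor(matrix, pereche1, pereche2):
-- 	"""
-- 	Problema 9.
-- 	Functia returneaza suma submatriciilor definite de cele doua puncte.
-- 	Intr-o pereche trebuie sa fie primul punct mai mic sau egal cu cel de al 2-lea.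
-- 	In: matricea initiala (lista de liste) si cele 2 perechi de puncte (tuple de tuple-uri).
-- 	Out: un tuple cu cele 2 sume sau none in cazul in care sunt date date gresite
-- 	"""
-- 	for index in range(1, len(matrix[0])):
-- 		matrix[0][index] += matrix[0][index - 1]
-- 	for index in range(1, len(matrix)):
-- 		matrix[index][0] += matrix[index - 1][0]
-- 	for i in range(1, len(matrix)):
-- 		for j in range(1, len(matrix[i])):
-- 			matrix[i][j] += matrix[i - 1][j] + matrix[i][j - 1]	- matrix[i - 1][j - 1]
-- 	return calculare_suma_submatrice(matrix, pereche1), calculare_suma_submatrice(matrix, pereche2)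
-- ===== SOURCE B (Python) =====
-- # B: no integral image at all -- each query is answered by summing the
-- # requested row segments of the original matrix directly (per-row prefix
-- # difference via slices); unlike A it does NOT mutate `matrix`, so the
-- # equivalence is about the return value only.
-- def suma_sub_matricilor(matrix, pereche1, pereche2):
--     def query(puncte):
--         if puncte[0] > puncte[1]:
--             return None
--         (a, b), (c, d) = puncte
--         return sum(sum(matrix[i][:d + 1]) - sum(matrix[i][:b]) for i in range(a, c + 1))
--     return query(pereche1), query(pereche2)
-- ===== Notes on version B (the rewrite author's own statement) =====
-- stated objective: simpler
-- what changed: A mutates the whole matrix into a 2D integral image with three index-loops and then answers each query through four inclusion-exclusion branches on that table; B builds no table at all and answers each query directly, summing for each row i in the query's row range the difference of two row-slice sums sum(matrix[i][:d+1]) - sum(matrix[i][:b]) over the untouched input matrix.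
-- outside the precondition, e.g. on suma_sub_matricilor([[1, 2], [3, 4]], ((-1, -1), (-1, -1)), ((0, 0), (0, 0))): A returns (6, 1), B returns (-3, 1); on suma_sub_matricilor([[1, 2], [3]], ((0, 0), (1, 0)), ((0, 0), (0, 0))): A returns (4, 1), B returns (4, 1)
import Mathlib
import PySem

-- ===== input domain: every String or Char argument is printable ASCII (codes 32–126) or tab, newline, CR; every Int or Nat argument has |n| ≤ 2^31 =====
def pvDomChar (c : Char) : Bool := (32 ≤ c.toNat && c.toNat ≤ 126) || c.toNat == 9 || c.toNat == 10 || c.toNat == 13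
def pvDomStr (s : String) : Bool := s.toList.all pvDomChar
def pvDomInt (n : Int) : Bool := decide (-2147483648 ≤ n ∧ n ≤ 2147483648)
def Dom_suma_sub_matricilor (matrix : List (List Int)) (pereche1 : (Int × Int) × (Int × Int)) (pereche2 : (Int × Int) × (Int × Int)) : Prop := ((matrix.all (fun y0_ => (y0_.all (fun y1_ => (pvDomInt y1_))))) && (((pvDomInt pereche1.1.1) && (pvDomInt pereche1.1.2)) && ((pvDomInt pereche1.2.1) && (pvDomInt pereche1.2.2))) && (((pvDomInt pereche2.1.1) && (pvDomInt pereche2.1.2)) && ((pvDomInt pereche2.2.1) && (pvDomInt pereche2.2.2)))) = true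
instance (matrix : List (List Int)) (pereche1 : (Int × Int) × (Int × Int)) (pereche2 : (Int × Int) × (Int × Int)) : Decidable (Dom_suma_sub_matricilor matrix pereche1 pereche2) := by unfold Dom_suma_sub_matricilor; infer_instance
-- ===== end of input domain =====

-- B builds no prefix-sum table: each query sums row segments of the original
-- matrix directly; A mutates `matrix` in place while B does not, so the
-- equivalence proved here is about the return value only.

-- ===== PORT A =====
-- Python's tuple comparison `puncte[0] > puncte[1]` on pairs of ints (lexicographic).
def pvLexGT (p q : Int × Int) : Bool := p.1 > q.1 || (p.1 == q.1 && p.2 > q.2)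

-- matrix[i][j] read / write; totalized with defaults — exact wherever Python
-- does not raise (Pre_ restricts indices to nonnegative in-range ones).
def pvGet (m : List (List Int)) (i j : Int) : Int :=
  PySem.List.pyGetD (PySem.List.pyGetD m i []) j 0

def pvSet (m : List (List Int)) (i j : Int) (v : Int) : List (List Int) :=
  PySem.List.pySetD m i (PySem.List.pySetD (PySem.List.pyGetD m i []) j v)

-- the three in-place loops of A building the prefix-sum matrix
def pvBuildA (matrix : List (List Int)) : List (List Int) :=
  let m1 := (PySem.List.pyRange 1 ((PySem.List.pyGetD matrix 0 []).length : Int) 1).foldl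
      (fun m index => pvSet m 0 index (pvGet m 0 index + pvGet m 0 (index - 1))) matrix
  let m2 := (PySem.List.pyRange 1 (m1.length : Int) 1).foldl
      (fun m index => pvSet m index 0 (pvGet m index 0 + pvGet m (index - 1) 0)) m1
  (PySem.List.pyRange 1 (m2.length : Int) 1).foldl
      (fun m i => (PySem.List.pyRange 1 ((PySem.List.pyGetD m i []).length : Int) 1).foldl
          (fun m j => pvSet m i j
            (pvGet m i j + (pvGet m (i - 1) j + pvGet m i (j - 1) - pvGet m (i - 1) (j - 1)))) m) m2

-- calculare_suma_submatrice
def pvCalc (m : List (List Int)) (puncte : (Int × Int) × (Int × Int)) : Option Int :=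
  if pvLexGT puncte.1 puncte.2 then none
  else if puncte.1 = ((0 : Int), (0 : Int)) then some (pvGet m puncte.2.1 puncte.2.2)
  else
    let A := (puncte.1.1 - 1, puncte.1.2 - 1)
    let B := puncte.2
    if A.1 < 0 then some (pvGet m B.1 B.2 - pvGet m B.1 A.2)
    else if A.2 < 0 then some (pvGet m B.1 B.2 - pvGet m A.1 B.2)
    else some (pvGet m B.1 B.2 + pvGet m A.1 A.2 - pvGet m A.1 B.2 - pvGet m B.1 A.2)

def suma_sub_matricilor (matrix : List (List Int)) (pereche1 : (Int × Int) × (Int × Int)) (pereche2 : (Int × Int) × (Int × Int)) : Option Int × Option Int :=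
  let m := pvBuildA matrix
  (pvCalc m pereche1, pvCalc m pereche2)

-- ===== PORT B =====
-- query(puncte): None on a lex-decreasing pair, else
-- sum(sum(matrix[i][:d+1]) - sum(matrix[i][:b]) for i in range(a, c+1))
def pvQueryB (matrix : List (List Int)) (puncte : (Int × Int) × (Int × Int)) : Option Int :=
  if pvLexGT puncte.1 puncte.2 then none
  else some (((PySem.List.pyRange puncte.1.1 (puncte.2.1 + 1) 1).map
      (fun i =>
        (PySem.List.slice (PySem.List.pyGetD matrix i []) none (some (puncte.2.2 + 1))).sum
          - (PySem.List.slice (PySem.List.pyGetD matrix i []) none (some puncte.1.2)).sum)).sum)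

def suma_sub_matricilor_alt (matrix : List (List Int)) (pereche1 : (Int × Int) × (Int × Int)) (pereche2 : (Int × Int) × (Int × Int)) : Option Int × Option Int :=
  (pvQueryB matrix pereche1, pvQueryB matrix pereche2)

-- ===== PRECONDITION & SPEC =====
-- One query pair is admissible if it compares as decreasing (A returns None
-- without indexing) or all its coordinates are nonnegative and in range.
def pvPreP (rows cols : Int) (p : (Int × Int) × (Int × Int)) : Prop :=
  pvLexGT p.1 p.2 = true ∨
    (0 ≤ p.1.1 ∧ p.1.1 ≤ rows ∧ 0 ≤ p.1.2 ∧ p.1.2 ≤ cols ∧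
     0 ≤ p.2.1 ∧ p.2.1 < rows ∧ 0 ≤ p.2.2 ∧ p.2.2 < cols)

-- Pre_ restricts to the natural domain of the task: a nonempty rectangular
-- matrix (with nonempty rows unless there is a single row — otherwise A's
-- column loop raises IndexError) and query points that are either decreasing
-- (A returns None) or nonnegative and in range; the excluded inputs on which A
-- still returns a value reach it through Python's negative-index wraparound or
-- through ragged rows, artefacts of A's in-place indexing.
def Pre_suma_sub_matricilor (matrix : List (List Int)) (pereche1 : (Int × Int) × (Int × Int)) (pereche2 : (Int × Int) × (Int × Int)) : Prop :=
  matrix ≠ [] ∧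
  (∀ row ∈ matrix, row.length = (matrix.headD []).length) ∧
  (1 ≤ (matrix.headD []).length ∨ matrix.length = 1) ∧
  pvPreP (matrix.length : Int) ((matrix.headD []).length : Int) pereche1 ∧
  pvPreP (matrix.length : Int) ((matrix.headD []).length : Int) pereche2

instance (matrix : List (List Int)) (pereche1 : (Int × Int) × (Int × Int)) (pereche2 : (Int × Int) × (Int × Int)) : Decidable (Pre_suma_sub_matricilor matrix pereche1 pereche2) := by
  unfold Pre_suma_sub_matricilor pvPreP; infer_instance

def pvWitness_suma_sub_matricilor : List (List Int) × ((Int × Int) × (Int × Int)) × ((Int × Int) × (Int × Int)) :=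
  ([[1, 2], [3, 4]], (((0 : Int), (0 : Int)), ((1 : Int), (1 : Int))), (((1 : Int), (1 : Int)), ((1 : Int), (1 : Int))))

def Spec_suma_sub_matricilor (matrix : List (List Int)) (pereche1 : (Int × Int) × (Int × Int)) (pereche2 : (Int × Int) × (Int × Int)) (out : Option Int × Option Int) : Prop := out = suma_sub_matricilor_alt matrix pereche1 pereche2
instance (matrix : List (List Int)) (pereche1 : (Int × Int) × (Int × Int)) (pereche2 : (Int × Int) × (Int × Int)) (out : Option Int × Option Int) : Decidable (Spec_suma_sub_matricilor matrix pereche1 pereche2 out) := by unfold Spec_suma_sub_matricilor; infer_instance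

-- ===== CLAIM (what is proved, stated in full; the proofs are below) =====
def Claim_equal_suma_sub_matricilor : Prop := ∀ (matrix : List (List Int)) (pereche1 : (Int × Int) × (Int × Int)) (pereche2 : (Int × Int) × (Int × Int)), Dom_suma_sub_matricilor matrix pereche1 pereche2 → Pre_suma_sub_matricilor matrix pereche1 pereche2 → Spec_suma_sub_matricilor matrix pereche1 pereche2 (suma_sub_matricilor matrix pereche1 pereche2)

-- ===== LEMMAS AND PROOFS =====

-- proof-side model of A's integral image: per-row running sums, then an
-- accumulation over rows; pv_build_eq shows A's three loops produce it
def pvAccumFrom (acc : Int) : List Int → List Int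
  | [] => []
  | x :: xs => (acc + x) :: pvAccumFrom (acc + x) xs

def pvAccum (row : List Int) : List Int := pvAccumFrom 0 row

def pvZipAdd (xs ys : List Int) : List Int := List.zipWith (· + ·) xs ys

def pvAccumRowsFrom (acc : List Int) : List (List Int) → List (List Int)
  | [] => []
  | r :: rs => pvZipAdd acc r :: pvAccumRowsFrom (pvZipAdd acc r) rs

def pvPrefix (matrix : List (List Int)) : List (List Int) :=
  match matrix.map pvAccum with
  | [] => []
  | r :: rs => r :: pvAccumRowsFrom r rs

-- T m r s = sum of the top-left r×s block of the original matrix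
def pvT (m : List (List Int)) (r s : Nat) : Int :=
  ((m.take r).map (fun row => (row.take s).sum)).sum

-- small list-indexing helpers
theorem pv_getD_append_len {α : Type} (l₁ l₂ : List α) (d : α) :
    (l₁ ++ l₂).getD l₁.length d = l₂.getD 0 d := by
  induction l₁ with
  | nil => rfl
  | cons a l ih => simpa [List.getD] using ih

theorem pv_getD_append_lt {α : Type} (l₁ l₂ : List α) (k : Nat) (h : k < l₁.length) (d : α) :
    (l₁ ++ l₂).getD k d = l₁.getD k d := by
  induction l₁ generalizing k with
  | nil => simp at h
  | cons a l ih =>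
    cases k with
    | zero => rfl
    | succ k => simpa using ih k (by simpa using h)

theorem pv_set_append_len {α : Type} (l₁ l₂ : List α) (v : α) :
    (l₁ ++ l₂).set l₁.length v = l₁ ++ l₂.set 0 v := by
  induction l₁ with
  | nil => rfl
  | cons a l ih => simp [ih]

theorem pv_getD_last {α : Type} (l : List α) (P : α) (h : l.getLast? = some P) (d : α) :
    l.getD (l.length - 1) d = P := by
  induction l with
  | nil => simp at h
  | cons a l ih =>
    cases l with
    | nil => simp_all
    | cons b l' =>
      rw [List.getLast?_cons_cons] at h
      simpa using ih h

theorem pv_get_cons_zero (r : List Int) (t : List (List Int)) (j : Int) :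
    pvGet (r :: t) 0 j = PySem.List.pyGetD r j 0 := by
  simp [pvGet, PySem.List.pyGetD_zero_cons]

theorem pv_set_cons_zero (r : List Int) (t : List (List Int)) (j : Int) (v : Int) :
    pvSet (r :: t) 0 j v = PySem.List.pySetD r j v :: t := by
  unfold pvSet
  rw [PySem.List.pyGetD_zero_cons, show (0 : Int) = ((0 : Nat) : Int) from rfl,
    PySem.List.pySetD_natCast]
  rfl

-- phase 1: the loop only rewrites row 0
theorem pv_row0_factor (l : List Int) (r : List Int) (t : List (List Int)) :
    l.foldl (fun m index => pvSet m 0 index (pvGet m 0 index + pvGet m 0 (index - 1))) (r :: t)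
      = (l.foldl (fun row j => PySem.List.pySetD row j
            (PySem.List.pyGetD row j 0 + PySem.List.pyGetD row (j - 1) 0)) r) :: t := by
  induction l generalizing r with
  | nil => rfl
  | cons j l ih =>
    simp only [List.foldl_cons, pv_get_cons_zero, pv_set_cons_zero]
    exact ih _

-- in-place 1D cumulative sum
theorem pv_cumsum_go (todo : List Int) : ∀ (pre : List Int) (acc : Int),
    pre.getLast? = some acc →
    (PySem.List.pyRange (pre.length : Int) ((pre.length + todo.length : Nat) : Int) 1).foldl
        (fun row j => PySem.List.pySetD row j
          (PySem.List.pyGetD row j 0 + PySem.List.pyGetD row (j - 1) 0)) (pre ++ todo)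
      = pre ++ pvAccumFrom acc todo := by
  induction todo with
  | nil =>
    intro pre acc h
    rw [PySem.List.pyRange_one_eq_nil (by push_cast [List.length_nil]; omega)]
    simp [pvAccumFrom]
  | cons x xs ih =>
    intro pre acc h
    have hpre : pre ≠ [] := by intro e; subst e; simp at h
    have hlen : 1 ≤ pre.length := List.length_pos_of_ne_nil hpre
    rw [PySem.List.pyRange_one_cons (by push_cast [List.length_cons]; omega), List.foldl_cons]
    have e1 : PySem.List.pyGetD (pre ++ x :: xs) (pre.length : Int) 0 = x := by
      rw [PySem.List.pyGetD_natCast, pv_getD_append_len]; rfl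
    have e2 : PySem.List.pyGetD (pre ++ x :: xs) ((pre.length : Int) - 1) 0 = acc := by
      rw [show (pre.length : Int) - 1 = ((pre.length - 1 : Nat) : Int) by omega,
        PySem.List.pyGetD_natCast, pv_getD_append_lt _ _ _ (by omega),
        pv_getD_last pre acc h]
    have e3 : PySem.List.pySetD (pre ++ x :: xs) (pre.length : Int) (x + acc)
        = pre ++ (x + acc) :: xs := by
      rw [PySem.List.pySetD_natCast, pv_set_append_len]; rfl
    rw [e1, e2, e3]
    rw [show (pre.length : Int) + 1 = (((pre ++ [x + acc]).length : Nat) : Int) by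
      simp, show ((pre.length + (x :: xs).length : Nat) : Int)
        = (((pre ++ [x + acc]).length + xs.length : Nat) : Int) by simp; omega]
    rw [show pre ++ (x + acc) :: xs = (pre ++ [x + acc]) ++ xs by simp]
    rw [ih (pre ++ [x + acc]) (x + acc) (by simp)]
    simp [pvAccumFrom, Int.add_comm acc x]

-- phase 2 shape: column-0 running sums, read-before-write
def pvCol0Accum (acc : Int) : List (List Int) → List (List Int)
  | [] => []
  | r :: rs => PySem.List.pySetD r 0 (PySem.List.pyGetD r 0 0 + acc)
      :: pvCol0Accum (PySem.List.pyGetD r 0 0 + acc) rs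

theorem pv_col0_go (todo : List (List Int)) : ∀ (pre : List (List Int)) (P : List Int),
    pre.getLast? = some P → (∀ r ∈ todo, r ≠ []) →
    (PySem.List.pyRange (pre.length : Int) ((pre.length + todo.length : Nat) : Int) 1).foldl
        (fun m index => pvSet m index 0 (pvGet m index 0 + pvGet m (index - 1) 0)) (pre ++ todo)
      = pre ++ pvCol0Accum (PySem.List.pyGetD P 0 0) todo := by
  induction todo with
  | nil =>
    intro pre P h _
    rw [PySem.List.pyRange_one_eq_nil (by push_cast [List.length_nil]; omega)]
    simp [pvCol0Accum]
  | cons r rs ih =>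
    intro pre P h hne
    have hpre : pre ≠ [] := by intro e; subst e; simp at h
    have hlen : 1 ≤ pre.length := List.length_pos_of_ne_nil hpre
    rw [PySem.List.pyRange_one_cons (by push_cast [List.length_cons]; omega), List.foldl_cons]
    have hrow : PySem.List.pyGetD (pre ++ r :: rs) (pre.length : Int) [] = r := by
      rw [PySem.List.pyGetD_natCast, pv_getD_append_len]; rfl
    have e1 : pvGet (pre ++ r :: rs) (pre.length : Int) 0 = PySem.List.pyGetD r 0 0 := by
      rw [pvGet, hrow]
    have e2 : pvGet (pre ++ r :: rs) ((pre.length : Int) - 1) 0 = PySem.List.pyGetD P 0 0 := by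
      rw [pvGet, show (pre.length : Int) - 1 = ((pre.length - 1 : Nat) : Int) by omega,
        PySem.List.pyGetD_natCast, pv_getD_append_lt _ _ _ (by omega), pv_getD_last pre P h]
    have e3 : ∀ v, pvSet (pre ++ r :: rs) (pre.length : Int) 0 v
        = pre ++ PySem.List.pySetD r 0 v :: rs := by
      intro v
      rw [pvSet, hrow, PySem.List.pySetD_natCast, pv_set_append_len]; rfl
    rw [e1, e2, e3]
    obtain ⟨y, yt, rfl⟩ := List.exists_cons_of_ne_nil (hne r (by simp))
    have hset : ∀ v : Int, PySem.List.pySetD (y :: yt) 0 v = v :: yt := by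
      intro v
      rw [show (0 : Int) = ((0 : Nat) : Int) from rfl, PySem.List.pySetD_natCast]; rfl
    rw [hset]
    rw [show (pre.length : Int) + 1
        = (((pre ++ [(PySem.List.pyGetD (y :: yt) 0 0 + PySem.List.pyGetD P 0 0) :: yt]).length : Nat) : Int) by
      simp, show ((pre.length + ((y :: yt) :: rs).length : Nat) : Int)
        = (((pre ++ [(PySem.List.pyGetD (y :: yt) 0 0 + PySem.List.pyGetD P 0 0) :: yt]).length + rs.length : Nat) : Int) by
      simp; omega]
    rw [show pre ++ ((PySem.List.pyGetD (y :: yt) 0 0 + PySem.List.pyGetD P 0 0) :: yt) :: rs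
        = (pre ++ [(PySem.List.pyGetD (y :: yt) 0 0 + PySem.List.pyGetD P 0 0) :: yt]) ++ rs by simp]
    rw [ih (pre ++ [(PySem.List.pyGetD (y :: yt) 0 0 + PySem.List.pyGetD P 0 0) :: yt])
        ((PySem.List.pyGetD (y :: yt) 0 0 + PySem.List.pyGetD P 0 0) :: yt) (by simp)
        (fun r hr => hne r (by simp [hr]))]
    simp [pvCol0Accum, hset, PySem.List.pyGetD_zero_cons]

-- phase 3 inner loop
theorem pv_inner_go (todoJ : List Int) :
    ∀ (done Pd Pt : List Int) (c dv pv : Int) (pre rest2 : List (List Int)),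
    pre.getLast? = some (Pd ++ Pt) → Pd.length = done.length →
    done.getLast? = some dv → Pd.getLast? = some pv → dv = pv + c →
    todoJ.length ≤ Pt.length →
    (PySem.List.pyRange (done.length : Int) ((done.length + todoJ.length : Nat) : Int) 1).foldl
        (fun m j => pvSet m (pre.length : Int) j
          (pvGet m (pre.length : Int) j + (pvGet m ((pre.length : Int) - 1) j
            + pvGet m (pre.length : Int) (j - 1) - pvGet m ((pre.length : Int) - 1) (j - 1))))
        (pre ++ (done ++ todoJ) :: rest2)
      = pre ++ (done ++ pvZipAdd Pt (pvAccumFrom c todoJ)) :: rest2 := by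
  induction todoJ with
  | nil =>
    intro done Pd Pt c dv pv pre rest2 hpre hlenP hdl hpl hrel hle
    rw [PySem.List.pyRange_one_eq_nil (by push_cast [List.length_nil]; omega)]
    simp [pvZipAdd, pvAccumFrom]
  | cons x xs ih =>
    intro done Pd Pt c dv pv pre rest2 hpre hlenP hdl hpl hrel hle
    have hdone : done ≠ [] := by intro e; subst e; simp at hdl
    have hPd : Pd ≠ [] := by intro e; subst e; simp at hpl
    have hpren : pre ≠ [] := by intro e; subst e; simp at hpre
    have hd1 : 1 ≤ done.length := List.length_pos_of_ne_nil hdone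
    have hq1 : 1 ≤ Pd.length := List.length_pos_of_ne_nil hPd
    have hp1 : 1 ≤ pre.length := List.length_pos_of_ne_nil hpren
    cases Pt with
    | nil => simp at hle
    | cons p Pt' =>
    rw [PySem.List.pyRange_one_cons (by push_cast [List.length_cons]; omega), List.foldl_cons]
    have hrow : PySem.List.pyGetD (pre ++ (done ++ x :: xs) :: rest2) (pre.length : Int) []
        = done ++ x :: xs := by
      rw [PySem.List.pyGetD_natCast, pv_getD_append_len]; rfl
    have hprev : PySem.List.pyGetD (pre ++ (done ++ x :: xs) :: rest2) ((pre.length : Int) - 1) []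
        = Pd ++ p :: Pt' := by
      rw [show (pre.length : Int) - 1 = ((pre.length - 1 : Nat) : Int) by omega,
        PySem.List.pyGetD_natCast, pv_getD_append_lt _ _ _ (by omega), pv_getD_last pre _ hpre]
    have e1 : pvGet (pre ++ (done ++ x :: xs) :: rest2) (pre.length : Int) (done.length : Int)
        = x := by
      rw [pvGet, hrow, PySem.List.pyGetD_natCast, pv_getD_append_len]; rfl
    have e2 : pvGet (pre ++ (done ++ x :: xs) :: rest2) ((pre.length : Int) - 1) (done.length : Int)
        = p := by
      rw [pvGet, hprev, PySem.List.pyGetD_natCast, ← hlenP, pv_getD_append_len]; rfl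
    have e3 : pvGet (pre ++ (done ++ x :: xs) :: rest2) (pre.length : Int) ((done.length : Int) - 1)
        = dv := by
      rw [pvGet, hrow, show (done.length : Int) - 1 = ((done.length - 1 : Nat) : Int) by omega,
        PySem.List.pyGetD_natCast, pv_getD_append_lt _ _ _ (by omega), pv_getD_last done _ hdl]
    have e4 : pvGet (pre ++ (done ++ x :: xs) :: rest2) ((pre.length : Int) - 1) ((done.length : Int) - 1)
        = pv := by
      rw [pvGet, hprev, show (done.length : Int) - 1 = ((done.length - 1 : Nat) : Int) by omega,
        PySem.List.pyGetD_natCast, pv_getD_append_lt _ _ _ (by omega),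
        show done.length - 1 = Pd.length - 1 by omega, pv_getD_last Pd _ hpl]
    have eset : ∀ v : Int, pvSet (pre ++ (done ++ x :: xs) :: rest2) (pre.length : Int) (done.length : Int) v
        = pre ++ (done ++ v :: xs) :: rest2 := by
      intro v
      have hsetrow : PySem.List.pySetD (done ++ x :: xs) (done.length : Int) v
          = done ++ v :: xs := by
        rw [PySem.List.pySetD_natCast, pv_set_append_len]; rfl
      rw [pvSet, hrow, hsetrow, PySem.List.pySetD_natCast, pv_set_append_len]; rfl
    rw [e1, e2, e3, e4, eset]
    rw [show pre ++ (done ++ (x + (p + dv - pv)) :: xs) :: rest2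
        = pre ++ ((done ++ [x + (p + dv - pv)]) ++ xs) :: rest2 by simp]
    rw [show (done.length : Int) + 1 = (((done ++ [x + (p + dv - pv)]).length : Nat) : Int) by simp,
      show ((done.length + (x :: xs).length : Nat) : Int)
        = (((done ++ [x + (p + dv - pv)]).length + xs.length : Nat) : Int) by simp; omega]
    rw [ih (done ++ [x + (p + dv - pv)]) (Pd ++ [p]) Pt' (c + x) (x + (p + dv - pv)) p pre rest2
      (by simpa using hpre) (by simp [hlenP]) (by simp) (by simp) (by omega) (by simpa using hle)]
    have hv : x + (p + dv - pv) = p + (c + x) := by omega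
    simp [pvZipAdd, pvAccumFrom, hv]

theorem pv_accumFrom_length (l : List Int) : ∀ c, (pvAccumFrom c l).length = l.length := by
  induction l with
  | nil => intro c; rfl
  | cons x xs ih => intro c; simp [pvAccumFrom, ih]

theorem pvCol0Accum_length (l : List (List Int)) : ∀ c, (pvCol0Accum c l).length = l.length := by
  induction l with
  | nil => intro c; rfl
  | cons r rs ih => intro c; simp [pvCol0Accum, ih]

-- phase 3 outer loop
theorem pv_outer_go (todo : List (List Int)) : ∀ (pre : List (List Int)) (P : List Int),
    pre.getLast? = some P → 1 ≤ P.length → (∀ r ∈ todo, r.length = P.length) →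
    (PySem.List.pyRange (pre.length : Int) ((pre.length + todo.length : Nat) : Int) 1).foldl
        (fun m i => (PySem.List.pyRange 1 ((PySem.List.pyGetD m i []).length : Int) 1).foldl
          (fun m j => pvSet m i j
            (pvGet m i j + (pvGet m (i - 1) j + pvGet m i (j - 1) - pvGet m (i - 1) (j - 1)))) m)
        (pre ++ pvCol0Accum (PySem.List.pyGetD P 0 0) todo)
      = pre ++ pvAccumRowsFrom P (todo.map pvAccum) := by
  induction todo with
  | nil =>
    intro pre P hpre h1P hlen
    rw [PySem.List.pyRange_one_eq_nil (by push_cast [List.length_nil]; omega)]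
    simp [pvCol0Accum, pvAccumRowsFrom]
  | cons r rs ih =>
    intro pre P hpre h1P hlen
    have hpren : pre ≠ [] := by intro e; subst e; simp at hpre
    have hp1 : 1 ≤ pre.length := List.length_pos_of_ne_nil hpren
    have hr : r.length = P.length := hlen r (by simp)
    cases P with
    | nil => simp at h1P
    | cons P0 Ptl =>
    have hrne : r ≠ [] := by intro e; subst e; simp at hr
    obtain ⟨r0, rt, rfl⟩ := List.exists_cons_of_ne_nil hrne
    simp only [pvCol0Accum, PySem.List.pyGetD_zero_cons]
    have hset : PySem.List.pySetD (r0 :: rt) 0 (r0 + P0) = (r0 + P0) :: rt := by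
      rw [show (0 : Int) = ((0 : Nat) : Int) from rfl, PySem.List.pySetD_natCast]; rfl
    rw [hset]
    rw [PySem.List.pyRange_one_cons (by push_cast [List.length_cons]; omega), List.foldl_cons]
    have hrow : PySem.List.pyGetD (pre ++ ((r0 + P0) :: rt) :: pvCol0Accum (r0 + P0) rs)
        (pre.length : Int) [] = (r0 + P0) :: rt := by
      rw [PySem.List.pyGetD_natCast, pv_getD_append_len]; rfl
    rw [hrow]
    rw [show PySem.List.pyRange 1 ((((r0 + P0) :: rt).length : Nat) : Int) 1
        = PySem.List.pyRange ((([r0 + P0] : List Int).length : Nat) : Int)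
            ((([r0 + P0] : List Int).length + rt.length : Nat) : Int) 1 by simp; ring_nf]
    rw [show pre ++ ((r0 + P0) :: rt) :: pvCol0Accum (r0 + P0) rs
        = pre ++ (([r0 + P0] : List Int) ++ rt) :: pvCol0Accum (r0 + P0) rs by simp]
    rw [pv_inner_go rt [r0 + P0] [P0] Ptl r0 (r0 + P0) P0 pre (pvCol0Accum (r0 + P0) rs)
      (by simpa using hpre) (by simp) (by simp) (by simp) (by omega)
      (by simp at hr; omega)]
    have hF : ([r0 + P0] : List Int) ++ pvZipAdd Ptl (pvAccumFrom r0 rt)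
        = pvZipAdd (P0 :: Ptl) (pvAccum (r0 :: rt)) := by
      simp [pvZipAdd, pvAccum, pvAccumFrom, Int.add_comm r0 P0]
    have hF0 : PySem.List.pyGetD (pvZipAdd (P0 :: Ptl) (pvAccum (r0 :: rt))) 0 0 = r0 + P0 := by
      simp [pvZipAdd, pvAccum, pvAccumFrom, PySem.List.pyGetD_zero_cons, Int.add_comm r0 P0]
    have hFlen : (pvZipAdd (P0 :: Ptl) (pvAccum (r0 :: rt))).length = Ptl.length + 1 := by
      simp only [pvZipAdd, pvAccum, pvAccumFrom, List.zipWith_cons_cons, List.length_cons,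
        List.length_zipWith, pv_accumFrom_length]
      simp at hr
      omega
    rw [show pre ++ (([r0 + P0] : List Int) ++ pvZipAdd Ptl (pvAccumFrom r0 rt))
          :: pvCol0Accum (r0 + P0) rs
        = (pre ++ [pvZipAdd (P0 :: Ptl) (pvAccum (r0 :: rt))]) ++ pvCol0Accum (r0 + P0) rs by
      rw [← hF]; simp]
    rw [← hF0]
    rw [show (pre.length : Int) + 1
        = (((pre ++ [pvZipAdd (P0 :: Ptl) (pvAccum (r0 :: rt))]).length : Nat) : Int) by simp,
      show ((pre.length + ((r0 :: rt) :: rs).length : Nat) : Int)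
        = (((pre ++ [pvZipAdd (P0 :: Ptl) (pvAccum (r0 :: rt))]).length + rs.length : Nat) : Int) by
        simp; omega]
    rw [ih (pre ++ [pvZipAdd (P0 :: Ptl) (pvAccum (r0 :: rt))])
      (pvZipAdd (P0 :: Ptl) (pvAccum (r0 :: rt))) (by simp) (by rw [hFlen]; omega)
      (by intro q hq; rw [hlen q (by simp [hq]), hFlen]; simp)]
    simp [pvAccumRowsFrom]

-- A's three loops build exactly the accumulated prefix matrix
theorem pv_build_eq (matrix : List (List Int)) (hne : matrix ≠ [])
    (hrect : ∀ row ∈ matrix, row.length = (matrix.headD []).length)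
    (hc : 1 ≤ (matrix.headD []).length ∨ matrix.length = 1) :
    pvBuildA matrix = pvPrefix matrix := by
  obtain ⟨r0, rest, rfl⟩ := List.exists_cons_of_ne_nil hne
  simp only [List.headD_cons] at hrect hc
  by_cases hc0 : r0.length = 0
  · have h1 : rest = [] := by
      rcases hc with h | h
      · omega
      · simpa using h
    subst h1
    have h2 : r0 = [] := List.eq_nil_of_length_eq_zero hc0
    subst h2
    decide
  · have hcols : 1 ≤ r0.length := by omega
    obtain ⟨x, xt, rfl⟩ := List.exists_cons_of_ne_nil (show r0 ≠ [] by intro e; subst e; simp at hc0)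
    have hrowsne : ∀ r ∈ rest, r ≠ [] := by
      intro r hr e
      have := hrect r (by simp [hr])
      subst e; simp at this
    simp only [pvBuildA, PySem.List.pyGetD_zero_cons]
    rw [pv_row0_factor]
    rw [show PySem.List.pyRange 1 (((x :: xt).length : Nat) : Int) 1
        = PySem.List.pyRange ((([x] : List Int).length : Nat) : Int)
            ((([x] : List Int).length + xt.length : Nat) : Int) 1 by simp; ring_nf]
    rw [show (x :: xt : List Int) = ([x] : List Int) ++ xt by simp]
    rw [pv_cumsum_go xt [x] x (by simp)]
    rw [show ([x] : List Int) ++ pvAccumFrom x xt = pvAccum (x :: xt) by simp [pvAccum, pvAccumFrom]]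
    rw [show PySem.List.pyRange 1 (((pvAccum (x :: xt) :: rest).length : Nat) : Int) 1
        = PySem.List.pyRange ((([pvAccum (x :: xt)] : List (List Int))).length : Int)
            ((([pvAccum (x :: xt)] : List (List Int)).length + rest.length : Nat) : Int) 1 by
      simp; ring_nf]
    rw [show pvAccum (x :: xt) :: rest = ([pvAccum (x :: xt)] : List (List Int)) ++ rest by simp]
    rw [pv_col0_go rest [pvAccum (x :: xt)] (pvAccum (x :: xt)) (by simp) hrowsne]
    rw [show PySem.List.pyRange 1
          ((((([pvAccum (x :: xt)] : List (List Int))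
              ++ pvCol0Accum (PySem.List.pyGetD (pvAccum (x :: xt)) 0 0) rest).length : Nat)) : Int) 1
        = PySem.List.pyRange ((([pvAccum (x :: xt)] : List (List Int)).length : Nat) : Int)
            ((([pvAccum (x :: xt)] : List (List Int)).length + rest.length : Nat) : Int) 1 by
      simp [pvCol0Accum_length]; ring_nf]
    rw [pv_outer_go rest [pvAccum (x :: xt)] (pvAccum (x :: xt)) (by simp)
      (by simp [pvAccum, pv_accumFrom_length])
      (by intro q hq; rw [hrect q (by simp [hq])]; simp [pvAccum, pv_accumFrom_length])]
    simp [pvPrefix]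

-- running-sum entries are prefix sums of the row
theorem pv_accumFrom_getD (row : List Int) : ∀ (c : Int) (k : Nat), k < row.length →
    (pvAccumFrom c row).getD k 0 = c + (row.take (k + 1)).sum := by
  induction row with
  | nil => intro c k h; simp at h
  | cons x xs ih =>
    intro c k h
    cases k with
    | zero => simp [pvAccumFrom]
    | succ k =>
      simp only [pvAccumFrom, List.getD_cons_succ]
      rw [ih (c + x) k (by simpa using h)]
      simp [List.take_succ_cons]
      ring

theorem pv_zipAdd_getD (u v : List Int) (s : Nat) (hu : s < u.length) (hv : s < v.length) :
    (pvZipAdd u v).getD s 0 = u.getD s 0 + v.getD s 0 := by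
  have hz : s < (pvZipAdd u v).length := by simp [pvZipAdd]; omega
  rw [List.getD_eq_getElem _ _ hz, List.getD_eq_getElem _ _ hu, List.getD_eq_getElem _ _ hv]
  simp [pvZipAdd]

theorem pv_zipAdd_length (u v : List Int) : (pvZipAdd u v).length = min u.length v.length := by
  simp [pvZipAdd]

-- entries of the accumulated rows: column-wise running sums
theorem pv_accumRows_getD (rs : List (List Int)) : ∀ (acc : List Int) (r s : Nat),
    r < rs.length → s < acc.length → (∀ x ∈ rs, x.length = acc.length) →
    ((pvAccumRowsFrom acc rs).getD r []).getD s 0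
      = acc.getD s 0 + (((rs.take (r + 1)).map (fun x => x.getD s 0)).sum) := by
  induction rs with
  | nil => intro acc r s h _ _; simp at h
  | cons x xs ih =>
    intro acc r s hr hs hlen
    have hx : x.length = acc.length := hlen x (by simp)
    have hzl : (pvZipAdd acc x).length = acc.length := by rw [pv_zipAdd_length]; omega
    cases r with
    | zero =>
      simp only [pvAccumRowsFrom, List.getD_cons_zero]
      rw [pv_zipAdd_getD acc x s hs (by omega)]
      simp
    | succ r =>
      simp only [pvAccumRowsFrom, List.getD_cons_succ]
      rw [ih (pvZipAdd acc x) r s (by simpa using hr) (by omega)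
        (by intro q hq; rw [hlen q (by simp [hq])]; omega)]
      rw [pv_zipAdd_getD acc x s hs (by omega)]
      simp [List.take_succ_cons]
      ring

-- the integral-image entry (r, s) is the top-left (r+1)×(s+1) block sum
theorem pv_prefix_get (m : List (List Int))
    (hrect : ∀ row ∈ m, row.length = (m.headD []).length)
    (r s : Nat) (hr : r < m.length) (hs : s < (m.headD []).length) :
    pvGet (pvPrefix m) ((r : Nat) : Int) ((s : Nat) : Int) = pvT m (r + 1) (s + 1) := by
  obtain ⟨m0, mt, rfl⟩ := List.exists_cons_of_ne_nil (show m ≠ [] by intro e; subst e; simp at hr)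
  simp only [List.headD_cons] at hrect hs
  have hacc0 : ∀ row : List Int, s < row.length → (pvAccum row).getD s 0 = (row.take (s + 1)).sum := by
    intro row h
    rw [pvAccum, pv_accumFrom_getD row 0 s h]; ring
  simp only [pvGet, PySem.List.pyGetD_natCast, pvPrefix, List.map_cons]
  cases r with
  | zero =>
    simp only [List.getD_cons_zero]
    rw [hacc0 m0 hs]
    simp [pvT]
  | succ r =>
    simp only [List.getD_cons_succ]
    have hlen : ∀ x ∈ mt.map pvAccum, x.length = (pvAccum m0).length := by
      intro q hq
      obtain ⟨w, hw, rfl⟩ := List.mem_map.mp hq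
      simp only [pvAccum, pv_accumFrom_length]
      rw [hrect w (by simp [hw]), hrect m0 (by simp)]
    rw [pv_accumRows_getD (mt.map pvAccum) (pvAccum m0) r s
      (by simpa using Nat.lt_of_succ_lt_succ hr)
      (by simp only [pvAccum, pv_accumFrom_length]; exact hs) hlen]
    rw [hacc0 m0 hs]
    rw [show (mt.map pvAccum).take (r + 1) = (mt.take (r + 1)).map pvAccum from
      (List.map_take).symm]
    rw [List.map_map]
    have hmap : ∀ w ∈ mt.take (r + 1), ((fun x => x.getD s 0) ∘ pvAccum) w = (w.take (s + 1)).sum := by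
      intro w hw
      simp only [Function.comp]
      exact hacc0 w (by rw [hrect w (by simp [List.mem_of_mem_take hw])]; exact hs)
    rw [List.map_congr_left hmap]
    simp only [pvT, List.take_succ_cons, List.map_cons, List.sum_cons]

-- block sums grow one row at a time
theorem pv_T_step (m : List (List Int)) (r s : Nat) (hr : r < m.length) :
    pvT m (r + 1) s = pvT m r s + ((m.getD r []).take s).sum := by
  simp only [pvT]
  rw [List.map_take, List.map_take, List.sum_take_succ _ r (by simpa using hr)]
  rw [List.getD_eq_getElem _ _ hr]
  simp

theorem pv_T_zero_right (m : List (List Int)) (r : Nat) : pvT m r 0 = 0 := by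
  simp [pvT]

-- B's per-row summation over a row range telescopes to block-sum differences
theorem pv_bsum (m : List (List Int)) (bd bb : Nat) : ∀ (n a : Nat), a + n ≤ m.length →
    ((PySem.List.pyRange ((a : Nat) : Int) (((a + n : Nat) : Nat) : Int) 1).map
      (fun i =>
        (PySem.List.slice (PySem.List.pyGetD m i []) none (some ((bd : Nat) : Int))).sum
          - (PySem.List.slice (PySem.List.pyGetD m i []) none (some ((bb : Nat) : Int))).sum)).sum
      = (pvT m (a + n) bd - pvT m a bd) - (pvT m (a + n) bb - pvT m a bb) := by
  intro n
  induction n with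
  | zero =>
    intro a _
    rw [PySem.List.pyRange_one_eq_nil (by omega)]
    simp
  | succ n ih =>
    intro a hle
    rw [PySem.List.pyRange_one_cons (by push_cast; omega), List.map_cons, List.sum_cons]
    rw [show ((a : Nat) : Int) + 1 = (((a + 1 : Nat) : Nat) : Int) by push_cast; omega,
      show (((a + (n + 1) : Nat) : Nat) : Int) = ((((a + 1) + n : Nat) : Nat) : Int) by push_cast; omega]
    rw [ih (a + 1) (by omega)]
    rw [PySem.List.pyGetD_natCast, PySem.List.slice_to_natCast, PySem.List.slice_to_natCast]
    rw [show a + (n + 1) = (a + 1) + n by omega]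
    rw [pv_T_step m a bd (by omega), pv_T_step m a bb (by omega)]
    ring

-- each pvCalc branch on the integral image equals B's direct row summation
theorem pv_query_eq (m : List (List Int))
    (hrect : ∀ row ∈ m, row.length = (m.headD []).length)
    (p : (Int × Int) × (Int × Int))
    (hp : pvPreP (m.length : Int) ((m.headD []).length : Int) p) :
    pvCalc (pvPrefix m) p = pvQueryB m p := by
  obtain ⟨⟨a, b⟩, ⟨c, d⟩⟩ := p
  by_cases hg : pvLexGT (a, b) (c, d) = true
  · simp [pvCalc, pvQueryB, hg]
  · rcases hp with hp | ⟨ha, har, hb, hbr, hc0, hcr, hd0, hdr⟩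
    · exact absurd hp hg
    -- name the Nat forms of the four coordinates
    obtain ⟨an, rfl⟩ : ∃ an : Nat, a = (an : Int) := ⟨a.toNat, (Int.toNat_of_nonneg ha).symm⟩
    obtain ⟨bn, rfl⟩ : ∃ bn : Nat, b = (bn : Int) := ⟨b.toNat, (Int.toNat_of_nonneg hb).symm⟩
    obtain ⟨cn, rfl⟩ : ∃ cn : Nat, c = (cn : Int) := ⟨c.toNat, (Int.toNat_of_nonneg hc0).symm⟩
    obtain ⟨dn, rfl⟩ : ∃ dn : Nat, d = (dn : Int) := ⟨d.toNat, (Int.toNat_of_nonneg hd0).symm⟩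
    have hcr' : (cn : Int) < (m.length : Int) := hcr
    have hdr' : (dn : Int) < ((m.headD []).length : Int) := hdr
    have hbr' : (bn : Int) ≤ ((m.headD []).length : Int) := hbr
    have hcn : cn < m.length := by exact_mod_cast hcr'
    have hdn : dn < (m.headD []).length := by exact_mod_cast hdr'
    have hbn : bn ≤ (m.headD []).length := by exact_mod_cast hbr'
    have hac : an ≤ cn := by
      simp only [pvLexGT, Bool.or_eq_true, Bool.and_eq_true, decide_eq_true_eq, beq_iff_eq,
        not_or, not_and] at hg
      omega
    -- B's value, as block-sum differences
    have hB : pvQueryB m (((an : Int), (bn : Int)), ((cn : Int), (dn : Int)))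
        = some ((pvT m (cn + 1) (dn + 1) - pvT m an (dn + 1)) - (pvT m (cn + 1) bn - pvT m an bn)) := by
      simp only [pvQueryB, if_neg hg]
      rw [show ((cn : Int) + 1) = ((an + (cn + 1 - an) : Nat) : Int) by push_cast; omega,
        show ((dn : Int) + 1) = (((dn + 1 : Nat)) : Int) by push_cast; ring]
      rw [pv_bsum m (dn + 1) bn (cn + 1 - an) an (by omega)]
      rw [show an + (cn + 1 - an) = cn + 1 by omega]
    rw [hB]
    unfold pvCalc
    rw [if_neg hg]
    simp only
    by_cases h00 : (((an : Int), (bn : Int)) : Int × Int) = ((0 : Int), (0 : Int))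
    · rw [if_pos h00]
      have h1 : (an : Int) = 0 := congrArg Prod.fst h00
      have h2 : (bn : Int) = 0 := congrArg Prod.snd h00
      have ha0 : an = 0 := by exact_mod_cast h1
      have hb0 : bn = 0 := by exact_mod_cast h2
      subst ha0; subst hb0
      rw [pv_prefix_get m hrect cn dn hcn hdn]
      simp [pvT]
    · rw [if_neg h00]
      by_cases haz : ((an : Int) - 1) < 0
      · rw [if_pos haz]
        have ha0 : an = 0 := by omega
        have hbn1 : 1 ≤ bn := by
          by_contra hb1
          have hb0 : bn = 0 := by omega
          exact h00 (by simp [ha0, hb0])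
        subst ha0
        rw [show ((bn : Int) - 1) = (((bn - 1 : Nat)) : Int) by omega]
        rw [pv_prefix_get m hrect cn dn hcn hdn,
          pv_prefix_get m hrect cn (bn - 1) hcn (by omega)]
        rw [show bn - 1 + 1 = bn by omega]
        simp [pvT]
      · rw [if_neg haz]
        have han1 : 1 ≤ an := by omega
        by_cases hbz : ((bn : Int) - 1) < 0
        · rw [if_pos hbz]
          have hb0 : bn = 0 := by omega
          subst hb0
          rw [show ((an : Int) - 1) = (((an - 1 : Nat)) : Int) by omega]
          rw [pv_prefix_get m hrect cn dn hcn hdn,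
            pv_prefix_get m hrect (an - 1) dn (by omega) hdn]
          rw [show an - 1 + 1 = an by omega]
          simp [pv_T_zero_right]
        · rw [if_neg hbz]
          have hbn1 : 1 ≤ bn := by omega
          rw [show ((an : Int) - 1) = (((an - 1 : Nat)) : Int) by omega,
            show ((bn : Int) - 1) = (((bn - 1 : Nat)) : Int) by omega]
          rw [pv_prefix_get m hrect cn dn hcn hdn,
            pv_prefix_get m hrect (an - 1) (bn - 1) (by omega) (by omega),
            pv_prefix_get m hrect (an - 1) dn (by omega) hdn,
            pv_prefix_get m hrect cn (bn - 1) hcn (by omega)]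
          rw [show an - 1 + 1 = an by omega, show bn - 1 + 1 = bn by omega]
          congr 1
          ring

-- ===== VERDICT (by name: the statement is the Claim_ definition above) =====
theorem suma_sub_matricilor_spec : Claim_equal_suma_sub_matricilor := by
  intro matrix pereche1 pereche2 _hdom hpre
  obtain ⟨hne, hrect, hc, hp1, hp2⟩ := hpre
  unfold Spec_suma_sub_matricilor suma_sub_matricilor suma_sub_matricilor_alt
  rw [pv_build_eq matrix hne hrect hc]
  exact Prod.ext (pv_query_eq matrix hrect pereche1 hp1) (pv_query_eq matrix hrect pereche2 hp2)
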